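-- pv_equiv track=rewrite | github.com/Amborsia/BaekjoonHub | 프로그래머스/1/135808. 과일 장수/과일 장수.py | solution
-- ===== SOURCE A (Python) =====
-- def solution(k, m, score):
--     answer = 0
--     score.sort(reverse = True)
--     count = 0
--     temp = score[count:count+m]
--     while(len(temp)>= m):
--         if len(temp)<= m:
--             answer += min(temp)*m
--         count += m
--         temp = score[count:count+m]
--
--     return answer
-- ===== SOURCE B (Python) =====
-- def solution(k, m, score):
--     # Sorted descending, each full box of m fruits is priced by its minimum,
--     # which sits at index m-1, 2m-1, 3m-1, ...: sum those and multiply by m.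
--     score.sort(reverse=True)
--     return m * sum(score[i] for i in range(m - 1, len(score), m))
-- ===== Notes on version B (the rewrite author's own statement) =====
-- stated objective: simpler
-- what changed: replaces the slice-a-chunk / min-scan while loop with a single stride sum over the indices m-1, 2m-1, ... of the descending-sorted list (each full box's minimum is the last element of its chunk), multiplied by m once at the end
import Mathlib
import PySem

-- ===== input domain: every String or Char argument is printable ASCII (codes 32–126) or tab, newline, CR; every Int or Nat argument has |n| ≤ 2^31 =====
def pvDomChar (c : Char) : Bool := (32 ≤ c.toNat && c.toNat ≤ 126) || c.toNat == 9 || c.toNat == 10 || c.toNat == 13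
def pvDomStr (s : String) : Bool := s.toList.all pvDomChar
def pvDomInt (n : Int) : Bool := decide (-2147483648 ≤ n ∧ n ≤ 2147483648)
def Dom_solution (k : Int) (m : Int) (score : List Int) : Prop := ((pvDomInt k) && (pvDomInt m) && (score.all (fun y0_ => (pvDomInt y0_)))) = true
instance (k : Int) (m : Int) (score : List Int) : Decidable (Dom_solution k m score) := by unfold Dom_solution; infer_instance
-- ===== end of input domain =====

-- B replaces A's slice-a-chunk / min-scan while loop with one stride sum over the indices
-- m-1, 2m-1, ... of the descending-sorted list, times m (objective: simpler).
-- Both A and B sort the argument list in place in Python; the theorems are about the return value.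

-- ===== PORT A =====
-- A's while loop: 'fuel' only guards totality (for m ≥ 1 the loop runs at most s.length times);
-- min([]) raises ValueError in Python and is reached only for m = 0, outside Pre_solution
-- (there the port's '.getD 0' stands in for the exception).
def solutionLoop (s : List Int) (m : Int) : Nat → Int → Int → Int
  | 0, _, answer => answer
  | fuel+1, count, answer =>
    let temp := PySem.List.slice s (some count) (some (count + m))
    if m ≤ (temp.length : Int) then
      let answer' := if (temp.length : Int) ≤ m
        then answer + (PySem.List.min? temp (fun x => x)).getD 0 * m
        else answer
      solutionLoop s m fuel (count + m) answer'
    else answer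

def solution (k : Int) (m : Int) (score : List Int) : Int :=
  let s := PySem.List.sorted score (fun x => x) true
  solutionLoop s m (s.length + 1) 0 0

-- ===== PORT B =====
-- sum(score[i] for i in range(m-1, len(score), m)) as a foldl over pyRange; every index the
-- range yields is in bounds for m ≥ 1, so pyGetD's default is never used there.
def solution_alt (k : Int) (m : Int) (score : List Int) : Int :=
  let s := PySem.List.sorted score (fun x => x) true
  m * ((PySem.List.pyRange (m - 1) (s.length : Int) m).foldl
        (fun acc i => acc + PySem.List.pyGetD s i 0) 0)

-- ===== PRECONDITION & SPEC =====
-- Pre_ excludes m ≤ 0, on which Python A never returns: for m = 0 it raises ValueError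
-- (min of the empty slice), and for m < 0 its while loop runs forever.
def Pre_solution (k : Int) (m : Int) (score : List Int) : Prop := 1 ≤ m
instance (k : Int) (m : Int) (score : List Int) : Decidable (Pre_solution k m score) := by unfold Pre_solution; infer_instance

def pvWitness_solution : Int × Int × List Int := (4, 2, [3, 1, 2, 4, 1])

def Spec_solution (k : Int) (m : Int) (score : List Int) (out : Int) : Prop := out = solution_alt k m score
instance (k : Int) (m : Int) (score : List Int) (out : Int) : Decidable (Spec_solution k m score out) := by unfold Spec_solution; infer_instance

-- ===== CLAIM (what is proved, stated in full; the proofs are below) =====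
def Claim_equal_solution : Prop := ∀ (k : Int) (m : Int) (score : List Int), Dom_solution k m score → Pre_solution k m score → Spec_solution k m score (solution k m score)

-- ===== LEMMAS AND PROOFS =====

-- Shared reference value: the sum of the minima (= last elements) of the successive full
-- chunks of m elements of t.
def chunkSum (m : Int) (t : List Int) : Int :=
  if h : 1 ≤ m ∧ m ≤ (t.length : Int) then
    ((t.take m.toNat).getLast?.getD 0) + chunkSum m (t.drop m.toNat)
  else 0
termination_by t.length
decreasing_by
  simp only [List.length_drop]
  omega

theorem foldl_min_desc (t : List Int) : ∀ (x : Int), (x :: t).Pairwise (· ≥ ·) →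
    List.foldl min x t = (x :: t).getLast?.getD 0 := by
  induction t with
  | nil => intro x _; simp
  | cons y t ih =>
    intro x h
    have hxy : x ≥ y := (List.pairwise_cons.mp h).1 y (by simp)
    have ht : (y :: t).Pairwise (· ≥ ·) := (List.pairwise_cons.mp h).2
    have : min x y = y := min_eq_right hxy
    simp only [List.foldl_cons, this]
    rw [ih y ht]
    simp

theorem min_desc (t : List Int) (hne : t ≠ []) (h : t.Pairwise (· ≥ ·)) :
    (PySem.List.min? t (fun y => y)).getD 0 = t.getLast?.getD 0 := by
  cases t with
  | nil => exact absurd rfl hne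
  | cons x t =>
    rw [PySem.List.min?_id_cons]
    simpa using foldl_min_desc t x h

theorem pyRange_pos_nil (a b m : Int) (hm : 0 < m) (hba : b ≤ a) :
    PySem.List.pyRange a b m = [] := by
  rw [PySem.List.pyRange_of_pos a b hm, if_neg (by omega)]
  simp

theorem pyRange_pos_cons (a b m : Int) (hm : 0 < m) (hab : a < b) :
    PySem.List.pyRange a b m = a :: PySem.List.pyRange (a + m) b m := by
  rw [PySem.List.pyRange_of_pos a b hm, PySem.List.pyRange_of_pos (a + m) b hm]
  have hdiv : (b - a + m - 1) / m = (b - (a + m) + m - 1) / m + 1 := by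
    have : b - a + m - 1 = (b - (a + m) + m - 1) + 1 * m := by ring
    rw [this, Int.add_mul_ediv_right _ _ (by omega)]
  by_cases hab2 : a + m < b
  · rw [if_pos hab, if_pos hab2]
    have hnn : 0 ≤ (b - (a + m) + m - 1) / m := Int.ediv_nonneg (by omega) (by omega)
    have htn : ((b - a + m - 1) / m).toNat = ((b - (a + m) + m - 1) / m).toNat + 1 := by omega
    rw [htn, List.range_succ_eq_map]
    simp only [List.map_cons, List.map_map, List.cons.injEq]
    refine ⟨by simp, ?_⟩
    apply List.map_congr_left
    intro k _
    simp only [Function.comp_apply, Nat.succ_eq_add_one]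
    push_cast
    ring
  · rw [if_pos hab, if_neg hab2]
    have h0 : (b - (a + m) + m - 1) / m = 0 :=
      Int.ediv_eq_zero_of_lt (by omega) (by omega)
    rw [hdiv, h0]
    simp

theorem pyRange_shift (a b m : Int) (hm : 0 < m) :
    PySem.List.pyRange (a + m) b m = (PySem.List.pyRange a (b - m) m).map (· + m) := by
  rw [PySem.List.pyRange_of_pos (a + m) b hm, PySem.List.pyRange_of_pos a (b - m) hm]
  have hnum : b - (a + m) + m - 1 = b - m - a + m - 1 := by ring
  rw [hnum, List.map_map]
  by_cases hc : a + m < b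
  · rw [if_pos hc, if_pos (by omega)]
    apply List.map_congr_left
    intro k _
    simp only [Function.comp_apply]
    ring
  · rw [if_neg hc, if_neg (by omega)]
    simp

theorem foldl_add_init (g : Int → Int) (l : List Int) (a : Int) :
    List.foldl (fun acc i => acc + g i) a l = a + List.foldl (fun acc i => acc + g i) 0 l := by
  rw [PySem.List.foldl_add, PySem.List.foldl_add]
  ring

theorem getD_take_last (s : List Int) (m : Int) (h1 : 1 ≤ m) (h2 : m ≤ (s.length : Int)) :
    s.getD (m - 1).toNat 0 = (s.take m.toNat).getLast?.getD 0 := by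
  have hm : m.toNat ≥ 1 := by omega
  have hms : m.toNat ≤ s.length := by omega
  have hlen : (s.take m.toNat).length = m.toNat := by
    simp only [List.length_take]
    omega
  have hidx : (m - 1).toNat = m.toNat - 1 := by omega
  rw [List.getLast?_eq_getElem?, hlen, List.getD_eq_getElem?_getD,
    List.getElem?_take, if_pos (by omega), hidx]

theorem foldB_eq_chunk (n : Nat) : ∀ (s : List Int), s.length = n → ∀ (m : Int), 1 ≤ m →
    (PySem.List.pyRange (m - 1) (s.length : Int) m).foldl
      (fun acc i => acc + PySem.List.pyGetD s i 0) 0 = chunkSum m s := by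
  induction n using Nat.strong_induction_on with
  | _ n ih =>
    intro s hn m hm
    by_cases hlen : m ≤ (s.length : Int)
    · rw [pyRange_pos_cons (m - 1) (s.length : Int) m (by omega) (by omega)]
      have hshift : PySem.List.pyRange (m - 1 + m) (s.length : Int) m =
          (PySem.List.pyRange (m - 1) ((s.length : Int) - m) m).map (· + m) :=
        pyRange_shift (m - 1) (s.length : Int) m (by omega)
      simp only [List.foldl_cons, hshift, List.foldl_map]
      rw [foldl_add_init]
      have hhead : (0 : Int) + PySem.List.pyGetD s (m - 1) 0 = (s.take m.toNat).getLast?.getD 0 := by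
        rw [PySem.List.pyGetD_of_nonneg s 0 (by omega), getD_take_last s m hm hlen]
        ring
      have hcongr : List.foldl (fun acc i => acc + PySem.List.pyGetD s (i + m) 0) 0
            (PySem.List.pyRange (m - 1) ((s.length : Int) - m) m)
          = List.foldl (fun acc i => acc + PySem.List.pyGetD (s.drop m.toNat) i 0) 0
            (PySem.List.pyRange (m - 1) ((s.length : Int) - m) m) := by
        apply PySem.List.foldl_congr_mem
        intro acc i hi
        have hiab := (PySem.List.mem_pyRange_iff_of_pos (by omega : (0:Int) < m) i).mp hi
        have hi0 : 0 ≤ i := by have := hiab.1; omega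
        rw [PySem.List.pyGetD_of_nonneg s 0 (by omega), PySem.List.pyGetD_of_nonneg _ 0 hi0]
        rw [List.getD_eq_getElem?_getD, List.getD_eq_getElem?_getD, List.getElem?_drop]
        have htn : (i + m).toNat = m.toNat + i.toNat := by omega
        rw [htn]
      rw [hcongr]
      have hdroplen : ((s.drop m.toNat).length : Int) = (s.length : Int) - m := by
        simp only [List.length_drop]
        omega
      rw [← hdroplen]
      rw [ih (s.drop m.toNat).length (by simp only [List.length_drop]; omega) _ rfl m hm]
      rw [hhead]
      conv_rhs => rw [chunkSum]
      rw [dif_pos ⟨hm, hlen⟩]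
    · rw [pyRange_pos_nil (m - 1) (s.length : Int) m (by omega) (by omega)]
      rw [chunkSum, dif_neg (by omega)]
      simp

theorem loop_eq (fuel : Nat) : ∀ (s : List Int) (m count answer : Int), 1 ≤ m → 0 ≤ count →
    s.Pairwise (· ≥ ·) → s.length < count.toNat + fuel →
    solutionLoop s m fuel count answer = answer + m * chunkSum m (s.drop count.toNat) := by
  induction fuel with
  | zero =>
    intro s m count answer hm hc _ hfuel
    have hdrop : s.drop count.toNat = [] := by
      apply List.drop_eq_nil_of_le
      omega
    rw [solutionLoop, hdrop, chunkSum, dif_neg (by simp; omega)]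
    ring
  | succ fuel ih =>
    intro s m count answer hm hc hpw hfuel
    rw [solutionLoop]
    have hslice : PySem.List.slice s (some count) (some (count + m)) =
        (s.drop count.toNat).take m.toNat := by
      rw [PySem.List.slice_toNat s hc (by omega)]
      congr 1
      omega
    simp only [hslice]
    set t := s.drop count.toNat with ht
    have htlen : t.length = s.length - count.toNat := by
      simp [ht]
    have htake : ((t.take m.toNat).length : Int) = min (m.toNat : Int) (t.length : Int) := by
      simp only [List.length_take]
      push_cast
      omega
    by_cases hcase : m ≤ ((t.take m.toNat).length : Int)
    · have hmt : m ≤ (t.length : Int) := by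
        rw [htake] at hcase; omega
      have hlen_eq : ((t.take m.toNat).length : Int) = m := by
        rw [htake]; omega
      rw [if_pos hcase, if_pos (by omega)]
      have htpw : (t.take m.toNat).Pairwise (· ≥ ·) :=
        hpw.sublist ((List.take_sublist _ _).trans (List.drop_sublist _ _))
      have htne : t.take m.toNat ≠ [] := by
        intro hnil
        rw [hnil] at hlen_eq
        simp at hlen_eq
        omega
      rw [min_desc _ htne htpw]
      have hdd : s.drop (count + m).toNat = t.drop m.toNat := by
        rw [ht, List.drop_drop]
        congr 1
        omega
      rw [ih s m (count + m) _ hm (by omega) hpw (by omega), hdd]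
      conv_rhs => rw [chunkSum]
      rw [dif_pos ⟨hm, hmt⟩]
      ring
    · rw [if_neg hcase]
      have hmt : ¬ (m ≤ (t.length : Int)) := by
        rw [htake] at hcase; omega
      rw [chunkSum, dif_neg (by omega)]
      ring

-- ===== VERDICT (by name: the statement is the Claim_ definition above) =====
theorem solution_spec : Claim_equal_solution := by
  intro k m score _ hpre
  unfold Spec_solution solution solution_alt
  have hpw : (PySem.List.sorted score (fun x => x) true).Pairwise (· ≥ ·) :=
    PySem.List.sorted_pairwise_rev score (fun x => x)
  show solutionLoop (PySem.List.sorted score (fun x => x) true) m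
      ((PySem.List.sorted score (fun x => x) true).length + 1) 0 0
    = m * ((PySem.List.pyRange (m - 1) ((PySem.List.sorted score (fun x => x) true).length : Int) m).foldl
        (fun acc i => acc + PySem.List.pyGetD (PySem.List.sorted score (fun x => x) true) i 0) 0)
  rw [loop_eq _ _ m 0 0 hpre le_rfl hpw (by simp)]
  rw [foldB_eq_chunk _ _ rfl m hpre]
  simp
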